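-- pv_equiv track=rewrite | github.com/trixionn/portfolio | brainfuck.py | get_clear
-- ===== SOURCE A (Python) =====
-- def get_clear(code):
-- 	brackets = 1
-- 	for index, ch in enumerate(code[1:]):
-- 		if ch == '[':
-- 			brackets += 1
-- 		elif ch == ']':
-- 			brackets -= 1
-- 		if brackets == 0:
-- 			return code[1:index+1], index+1
-- ===== SOURCE B (Python) =====
-- def get_clear(code):
--     # Jump from ']' to ']' with str.find; the matching close bracket is the first
--     # ']' at position p >= 1 whose preceding slice code[1:p] has balanced counts
--     # of '[' and ']' (the running depth starting at 1 hits 0 exactly there).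
--     p = code.find(']', 1)
--     while p != -1:
--         inner = code[1:p]
--         if inner.count('[') == inner.count(']'):
--             return inner, p
--         p = code.find(']', p + 1)
-- ===== Notes on version B (the rewrite author's own statement) =====
-- stated objective: faster
-- what changed: A scans every character once in Python maintaining a running depth counter; B maintains no counter during any scan: it jumps from one ']' to the next with str.find and, for each candidate close bracket p, tests the closed-form balance condition code[1:p].count('[') == code[1:p].count(']'), returning at the first candidate that passes.
import Mathlib
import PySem

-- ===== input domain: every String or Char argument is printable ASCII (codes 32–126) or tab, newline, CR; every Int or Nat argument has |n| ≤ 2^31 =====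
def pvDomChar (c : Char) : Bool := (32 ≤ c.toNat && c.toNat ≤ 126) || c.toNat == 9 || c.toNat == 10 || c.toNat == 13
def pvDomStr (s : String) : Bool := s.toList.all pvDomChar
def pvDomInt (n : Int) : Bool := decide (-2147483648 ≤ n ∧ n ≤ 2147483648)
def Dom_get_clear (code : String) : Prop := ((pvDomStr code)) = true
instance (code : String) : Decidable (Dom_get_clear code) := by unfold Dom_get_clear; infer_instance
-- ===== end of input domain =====

-- B replaces A's running depth counter by find-driven jumps between ']' candidates,
-- each tested with a closed-form slice-count balance condition (objective: alternative).

-- ===== PORT A =====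
-- A's loop: enumerate(code[1:]), depth counter `brackets`, implicit None at the end.
-- `index` is the 0-based enumerate index (a Nat, cast to Int on return);
-- code[1:index+1] = (cs.drop 1).take index (both bounds nonnegative, so exact).
def getClearLoopA (cs : List Char) : List Char → Nat → Int → Option (String × Int)
  | [], _, _ => none
  | ch :: rest, index, brackets =>
    let b := if ch = '[' then brackets + 1 else if ch = ']' then brackets - 1 else brackets
    if b = 0 then some (String.ofList ((cs.drop 1).take index), ((index : Int) + 1))
    else getClearLoopA cs rest (index + 1) b

def get_clear (code : String) : Option (String × Int) :=
  getClearLoopA code.toList (code.toList.drop 1) 0 1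

-- ===== PORT B =====
-- hand port of Python's code.find(']', start): first index ≥ start holding ']'
-- (Option Nat instead of the -1 sentinel; exact on every input).
def findClose (cs : List Char) (start : Nat) : Option Nat :=
  (List.range' start (cs.length - start)).find? (fun i => cs.getD i ' ' == ']')

-- needed by getClearLoopB's decreasing_by
theorem findClose_some_lt {cs : List Char} {start p : Nat}
    (h : findClose cs start = some p) : start ≤ p ∧ p < cs.length := by
  have hmem := List.mem_of_find?_eq_some h
  have := List.mem_range'_1.mp hmem
  omega

-- B's while loop: jump to the next ']' with find, test the slice-count balance;
-- code[1:p] = (cs.take p).drop 1 (both bounds nonnegative, so exact).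
def getClearLoopB (cs : List Char) (start : Nat) : Option (String × Int) :=
  match h : findClose cs start with
  | none => none
  | some p =>
    let inner := (cs.take p).drop 1
    if inner.count '[' = inner.count ']' then some (String.ofList inner, (p : Int))
    else getClearLoopB cs (p + 1)
termination_by cs.length - start
decreasing_by
  have := findClose_some_lt h
  omega

def get_clear_alt (code : String) : Option (String × Int) :=
  getClearLoopB code.toList 1

-- ===== PRECONDITION & SPEC =====
def Spec_get_clear (code : String) (out : Option (String × Int)) : Prop := out = get_clear_alt code
instance (code : String) (out : Option (String × Int)) : Decidable (Spec_get_clear code out) := by unfold Spec_get_clear; infer_instance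

-- ===== CLAIM (what is proved, stated in full; the proofs are below) =====
def Claim_equal_get_clear : Prop := ∀ (code : String), Dom_get_clear code → Spec_get_clear code (get_clear code)

-- ===== LEMMAS AND PROOFS =====

-- Common characterisation: the first q ≥ start with cs[q] = ']' whose slice
-- (cs.take q).tail has equal '[' and ']' counts, packaged as A/B's return value.
def condAt (cs : List Char) (q : Nat) : Bool :=
  cs[q]?.getD ' ' == ']' &&
    ((cs.take q).tail).count '[' == ((cs.take q).tail).count ']'

def specFrom (cs : List Char) (start : Nat) : Option (String × Int) :=
  ((List.range' start (cs.length - start)).find? (condAt cs)).map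
    (fun q => (String.ofList ((cs.take q).tail), (q : Int)))

theorem loopB_none {cs : List Char} {start : Nat} (h : findClose cs start = none) :
    getClearLoopB cs start = none := by
  rw [getClearLoopB]
  split
  · rfl
  · rename_i p hp; rw [h] at hp; cases hp

theorem loopB_some {cs : List Char} {start p : Nat} (h : findClose cs start = some p) :
    getClearLoopB cs start =
      (if ((cs.take p).drop 1).count '[' = ((cs.take p).drop 1).count ']'
       then some (String.ofList ((cs.take p).drop 1), (p : Int))
       else getClearLoopB cs (p + 1)) := by
  rw [getClearLoopB]
  split
  · rename_i hp; rw [h] at hp; cases hp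
  · rename_i q hq; rw [h] at hq; cases hq; rfl

theorem tail_append_single {l : List Char} (c : Char) (h : l ≠ []) :
    (l ++ [c]).tail = l.tail ++ [c] := by
  cases l with
  | nil => exact absurd rfl h
  | cons a t => simp

theorem loopB_eq_spec (cs : List Char) :
    ∀ k start, cs.length - start ≤ k → getClearLoopB cs start = specFrom cs start := by
  intro k
  induction k with
  | zero =>
    intro start h
    have h0 : cs.length - start = 0 := by omega
    have hn : findClose cs start = none := by simp [findClose, h0]
    rw [loopB_none hn]
    simp [specFrom, h0]
  | succ k ih =>
    intro start h
    by_cases h0 : cs.length - start = 0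
    · have hn : findClose cs start = none := by simp [findClose, h0]
      rw [loopB_none hn]
      simp [specFrom, h0]
    · have hrange : List.range' start (cs.length - start)
          = start :: List.range' (start + 1) (cs.length - (start + 1)) := by
        have h1 : cs.length - start = (cs.length - (start + 1)) + 1 := by omega
        rw [h1, List.range'_succ]
      by_cases hc : cs[start]?.getD ' ' = ']'
      · have hfc : findClose cs start = some start := by
          simp [findClose, hrange, List.find?_cons, List.getD, hc]
        rw [loopB_some hfc]
        by_cases heq : ((cs.take start).tail).count '[' = ((cs.take start).tail).count ']'
        · have hcond : condAt cs start = true := by simp [condAt, hc, heq]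
          simp [specFrom, hrange, List.find?_cons, hcond, heq]
        · have hcond : condAt cs start = false := by simp [condAt, heq]
          rw [if_neg (by simpa using heq), ih (start + 1) (by omega)]
          simp [specFrom, hrange, List.find?_cons, hcond]
      · have hfc : findClose cs start = findClose cs (start + 1) := by
          simp [findClose, hrange, List.find?_cons, List.getD, hc]
        have hcond : condAt cs start = false := by simp [condAt, hc]
        have hB : getClearLoopB cs start = getClearLoopB cs (start + 1) := by
          cases hfc' : findClose cs (start + 1) with
          | none => rw [loopB_none (hfc.trans hfc'), loopB_none hfc']
          | some p => rw [loopB_some (hfc.trans hfc'), loopB_some hfc']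
        rw [hB, ih (start + 1) (by omega)]
        simp [specFrom, hrange, List.find?_cons, hcond]

theorem take_one_tail (l : List Char) : (l.take 1).tail = [] := by
  cases l <;> simp

theorem loopA_eq_spec (cs : List Char) :
    ∀ (rest : List Char) (idx : Nat) (b : Int),
      rest = cs.drop (idx + 1) →
      b = 1 + (((cs.take (idx + 1)).tail).count '[' : Int)
            - (((cs.take (idx + 1)).tail).count ']' : Int) →
      1 ≤ b →
      getClearLoopA cs rest idx b = specFrom cs (idx + 1) := by
  intro rest
  induction rest with
  | nil =>
    intro idx b hrest _ _
    have hlen : cs.length ≤ idx + 1 := by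
      by_contra h
      have := List.drop_eq_nil_iff.mp hrest.symm
      omega
    have h0 : cs.length - (idx + 1) = 0 := by omega
    simp [getClearLoopA, specFrom, h0]
  | cons ch rs ih =>
    intro idx b hrest hinv hge
    have hlt : idx + 1 < cs.length := by
      by_contra h
      have : cs.drop (idx + 1) = [] := List.drop_eq_nil_iff.mpr (by omega)
      rw [this] at hrest; exact (List.cons_ne_nil _ _) hrest
    have hch : cs[idx + 1]? = some ch := by
      have h0 : (cs.drop (idx + 1))[0]? = cs[idx + 1]? := by simp [List.getElem?_drop]
      rw [← h0, ← hrest]; rfl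
    have hgd : cs[idx + 1]?.getD ' ' = ch := by rw [hch]; rfl
    have hrs : rs = cs.drop (idx + 1 + 1) := by
      have h1 : cs.drop (idx + 1 + 1) = (cs.drop (idx + 1)).drop 1 := by
        rw [List.drop_drop]
      rw [h1, ← hrest]; simp
    -- the inner slice grows by the current character
    have hne0 : cs.take (idx + 1) ≠ [] := by
      intro hnil
      rcases List.take_eq_nil_iff.mp hnil with h' | h'
      · omega
      · subst h'; simp at hlt
    have hstep : (cs.take (idx + 1 + 1)).tail = (cs.take (idx + 1)).tail ++ [ch] := by
      rw [List.take_add_one, hch]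
      exact tail_append_single ch hne0
    have hrange : List.range' (idx + 1) (cs.length - (idx + 1))
        = (idx + 1) :: List.range' (idx + 1 + 1) (cs.length - (idx + 1 + 1)) := by
      have h1 : cs.length - (idx + 1) = (cs.length - (idx + 1 + 1)) + 1 := by omega
      rw [h1, List.range'_succ]
    have htail : (cs.take (idx + 1)).tail = (cs.drop 1).take idx := by
      rw [← List.drop_one, List.drop_take]
      simp
    by_cases hL : ch = '['
    · have hcond : condAt cs (idx + 1) = false := by simp [condAt, hgd, hL]
      have hb : ¬ (b + 1 = 0) := by omega
      have hA : getClearLoopA cs (ch :: rs) idx b = getClearLoopA cs rs (idx + 1) (b + 1) := by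
        simp [getClearLoopA, hL, hb]
      have hinv' : b + 1 = 1 + (((cs.take (idx + 1 + 1)).tail).count '[' : Int)
            - (((cs.take (idx + 1 + 1)).tail).count ']' : Int) := by
        rw [hstep]; simp [List.count_append, hL]; push_cast; omega
      rw [hA, ih (idx + 1) (b + 1) hrs hinv' (by omega)]
      simp [specFrom, hrange, List.find?_cons, hcond]
    · by_cases hR : ch = ']'
      · have hcnt : condAt cs (idx + 1)
            = (((cs.take (idx + 1)).tail).count '[' == ((cs.take (idx + 1)).tail).count ']') := by
          simp [condAt, hgd, hR]
        by_cases hz : b - 1 = 0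
        · have heq : ((cs.take (idx + 1)).tail).count '[' = ((cs.take (idx + 1)).tail).count ']' := by
            omega
          have hcond : condAt cs (idx + 1) = true := by rw [hcnt]; simp [heq]
          simp [getClearLoopA, hL, hR, hz, specFrom, hrange, List.find?_cons, hcond, htail]
        · have hne : ((cs.take (idx + 1)).tail).count '[' ≠ ((cs.take (idx + 1)).tail).count ']' := by
            omega
          have hcond : condAt cs (idx + 1) = false := by rw [hcnt]; simp [hne]
          have hA : getClearLoopA cs (ch :: rs) idx b = getClearLoopA cs rs (idx + 1) (b - 1) := by
            simp [getClearLoopA, hL, hR, hz]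
          have hinv' : b - 1 = 1 + (((cs.take (idx + 1 + 1)).tail).count '[' : Int)
                - (((cs.take (idx + 1 + 1)).tail).count ']' : Int) := by
            rw [hstep]; simp [List.count_append, hR]; push_cast; omega
          rw [hA, ih (idx + 1) (b - 1) hrs hinv' (by omega)]
          simp [specFrom, hrange, List.find?_cons, hcond]
      · have hcond : condAt cs (idx + 1) = false := by simp [condAt, hgd, hR]
        have hb : ¬ (b = 0) := by omega
        have hA : getClearLoopA cs (ch :: rs) idx b = getClearLoopA cs rs (idx + 1) b := by
          simp [getClearLoopA, hL, hR, hb]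
        have hinv' : b = 1 + (((cs.take (idx + 1 + 1)).tail).count '[' : Int)
              - (((cs.take (idx + 1 + 1)).tail).count ']' : Int) := by
          rw [hstep]; simp [List.count_append, hL, hR]; omega
        rw [hA, ih (idx + 1) b hrs hinv' hge]
        simp [specFrom, hrange, List.find?_cons, hcond]

-- ===== VERDICT (by name: the statement is the Claim_ definition above) =====
theorem get_clear_spec : Claim_equal_get_clear := by
  intro code _
  unfold Spec_get_clear get_clear get_clear_alt
  rw [loopA_eq_spec code.toList (code.toList.drop 1) 0 1 rfl (by simp [take_one_tail]) (by norm_num)]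
  rw [loopB_eq_spec code.toList code.toList.length 1 (by omega)]
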